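-- pv_equiv track=rewrite | github.com/mayuribondge/Python_Programming | Assignment 5/Program4.py | Equivalent
-- ===== SOURCE A (Python) =====
-- def Equivalent(No):
--
--     Binary=0
--     Place=1
--
--     while No > 0:
--         Rem = No % 2
--         Binary = Binary + (Rem * Place)
--         Place = Place * 10
--         No = No // 2
--
--     return Binary
-- ===== SOURCE B (Python) =====
-- def Equivalent(No):
--     if No <= 0:
--         return 0
--     return Equivalent(No // 2) * 10 + No % 2
-- ===== Notes on version B (the rewrite author's own statement) =====
-- stated objective: simpler
-- what changed: Replaced the iterative least-significant-first loop with Binary/Place accumulators by the standard base-conversion recursion that appends the low bit to the recursively converted quotient, building digits most-significant-first with no auxiliary state.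
import Mathlib
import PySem

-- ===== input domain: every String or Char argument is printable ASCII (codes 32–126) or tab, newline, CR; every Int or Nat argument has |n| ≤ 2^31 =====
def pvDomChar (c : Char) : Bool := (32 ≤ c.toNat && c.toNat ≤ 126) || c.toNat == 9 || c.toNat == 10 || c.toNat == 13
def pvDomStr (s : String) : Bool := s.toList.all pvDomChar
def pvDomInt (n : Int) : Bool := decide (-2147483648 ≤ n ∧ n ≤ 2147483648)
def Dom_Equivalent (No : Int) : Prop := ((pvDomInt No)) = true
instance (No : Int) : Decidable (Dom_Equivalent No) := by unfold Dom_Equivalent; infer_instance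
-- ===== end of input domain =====

-- B replaces A's iterative accumulator loop by the standard base-conversion recursion; same result.
-- ===== PORT A =====
-- loop state: (No, Binary, Place) as in A's while loop
def eqLoop (No Binary Place : Int) : Int :=
  if h : No > 0 then
    eqLoop (PySem.Int.floordiv No 2) (Binary + (PySem.Int.mod No 2) * Place) (Place * 10)
  else Binary
termination_by No.toNat
decreasing_by
  rw [PySem.Int.floordiv_eq_ediv_of_pos (by omega : (0:Int) < 2)]
  omega

def Equivalent (No : Int) : Int := eqLoop No 0 1

-- ===== PORT B =====
def Equivalent_alt (No : Int) : Int :=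
  if h : No ≤ 0 then 0
  else Equivalent_alt (PySem.Int.floordiv No 2) * 10 + PySem.Int.mod No 2
termination_by No.toNat
decreasing_by
  rw [PySem.Int.floordiv_eq_ediv_of_pos (by omega : (0:Int) < 2)]
  omega

-- ===== PRECONDITION & SPEC =====
def Spec_Equivalent (No : Int) (out : Int) : Prop := out = Equivalent_alt No
instance (No : Int) (out : Int) : Decidable (Spec_Equivalent No out) := by unfold Spec_Equivalent; infer_instance

-- ===== CLAIM (what is proved, stated in full; the proofs are below) =====
def Claim_equal_Equivalent : Prop := ∀ (No : Int), Dom_Equivalent No → Spec_Equivalent No (Equivalent No)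

-- ===== LEMMAS AND PROOFS =====

-- ===== VERDICT (by name: the statement is the Claim_ definition above) =====
theorem eqLoop_eq_alt (n : Int) : ∀ B P : Int, eqLoop n B P = B + P * Equivalent_alt n := by
  induction n using Equivalent_alt.induct with
  | case1 n h =>
    intro B P
    rw [eqLoop, Equivalent_alt]
    simp [h, show ¬ n > 0 by omega]
  | case2 n h ih =>
    intro B P
    rw [eqLoop, dif_pos (by omega : n > 0), ih]
    conv_rhs => rw [Equivalent_alt, dif_neg h]
    ring

theorem Equivalent_spec : Claim_equal_Equivalent := by
  intro No _
  unfold Spec_Equivalent Equivalent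
  rw [eqLoop_eq_alt]
  ring
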